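-- pv_equiv track=rewrite | github.com/JAYAKRISH369/PasswordGeneratorApp | password_gen.py | generate_password_logic
-- ===== SOURCE A (Python) =====
-- def generate_password_logic(name, key, part1, part2):
--     s = name + part1 + part2
--     str_set = set(s)
--     common_count = len(s) - len(str_set)
--     value = len(name) - common_count
--
--     symbols = {1: "!", 2: "@", 3: "#", 4: "$", 5: "%", 6: "^", 7: "&", 8: "*", 9: "(", 0: ")"}
--     upper = chr(ord(name[0]) + value)
--     special = str(value) + str(len(name)) + str(value + len(name)) + upper.upper() + symbols.get(value % 10, '!')
--
--     password = ""
--     y = u = 0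
--     while y < len(special) and u < len(key):
--         password += special[y] + chr(ord(key[u]) + value)
--         y += 1
--         u += 1
--     while y < len(special):
--         password += special[y]
--         y += 1
--     while u < len(key):
--         password += chr(ord(key[u]) + value)
--         u += 1
--
--     return password
-- ===== SOURCE B (Python) =====
-- def generate_password_logic(name, key, part1, part2):
--     s = name + part1 + part2
--     value = len(name) - (len(s) - len(set(s)))
--     symbols = ")!@#$%^&*("
--     special = (str(value) + str(len(name)) + str(value + len(name))
--                + chr(ord(name[0]) + value).upper() + symbols[value % 10])
--     chars = [chr(ord(c) + value) for c in key]
--     for i, ch in enumerate(special):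
--         chars.insert(2 * i, ch)
--     return "".join(chars)
-- ===== Notes on version B (the rewrite author's own statement) =====
-- stated objective: alternative
-- what changed: Instead of A's three sequential while-loops concatenating onto a string, B first makes the shifted-key character list and then inserts each header character at position 2*i via list.insert in a single enumerate loop (past-the-end positions clamp to appends), joining at the end; the symbols dict becomes an indexed string.
import Mathlib
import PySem

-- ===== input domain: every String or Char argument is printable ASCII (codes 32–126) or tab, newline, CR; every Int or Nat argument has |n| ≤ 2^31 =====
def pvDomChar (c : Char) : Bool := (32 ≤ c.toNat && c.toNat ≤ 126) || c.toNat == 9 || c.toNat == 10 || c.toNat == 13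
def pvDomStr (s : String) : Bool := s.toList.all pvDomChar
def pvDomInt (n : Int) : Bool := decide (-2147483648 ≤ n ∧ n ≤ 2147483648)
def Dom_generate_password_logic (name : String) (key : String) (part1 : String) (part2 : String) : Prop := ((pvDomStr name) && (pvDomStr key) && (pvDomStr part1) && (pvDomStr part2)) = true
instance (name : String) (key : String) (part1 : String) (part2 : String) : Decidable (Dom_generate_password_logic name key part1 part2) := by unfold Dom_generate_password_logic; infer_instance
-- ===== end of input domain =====

-- B builds the password by list.insert-ing each header char at position 2*i into the shifted-key
-- list (one enumerate loop with in-place insertion) instead of A's three concatenating while-loops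
-- (objective: alternative). Equivalence is about the return value; neither version mutates arguments.

-- ===== PORT A =====

-- chr(ord(c) + v): total form; faithful to Python exactly when 0 ≤ ord(c)+v and the code is a
-- valid non-surrogate codepoint (on Dom ∩ Pre_ the code is ≤ 224, so this is exact there)
def pvShift (c : Char) (v : Int) : Char := Char.ofNat ((c.toNat : Int) + v).toNat

-- single-character str.upper(): hand-ported, exact vs CPython for codepoints ≤ 255 (on Dom the
-- argument's code is ≤ 224, so this is exact there)
def pvUpperChr (c : Char) : List Char :=
  let n := c.toNat
  if 97 ≤ n ∧ n ≤ 122 then [Char.ofNat (n - 32)]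
  else if n = 181 then [Char.ofNat 924]
  else if n = 223 then ['S', 'S']
  else if n = 255 then [Char.ofNat 376]
  else if 224 ≤ n ∧ n ≤ 254 ∧ n ≠ 247 then [Char.ofNat (n - 32)]
  else [c]

def pvSymbolsA : PySem.Dict Int String :=
  PySem.Dict.ofList [(1, "!"), (2, "@"), (3, "#"), (4, "$"), (5, "%"), (6, "^"), (7, "&"), (8, "*"), (9, "("), (0, ")")]

-- second while loop: copies the rest of special
def pvLoop2 (sp : List Char) : List Char :=
  match sp with
  | [] => []
  | c :: cs => c :: pvLoop2 cs

-- third while loop: shifts the rest of key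
def pvLoop3 (ks : List Char) (v : Int) : List Char :=
  match ks with
  | [] => []
  | c :: cs => pvShift c v :: pvLoop3 cs v

-- first while loop (both indices in range), then falls through to the remaining two loops
def pvLoop1 (sp ks : List Char) (v : Int) : List Char :=
  match sp, ks with
  | s :: ss, k :: kk => s :: pvShift k v :: pvLoop1 ss kk v
  | sp, ks => pvLoop2 sp ++ pvLoop3 ks v

def generate_password_logic (name : String) (key : String) (part1 : String) (part2 : String) : String :=
  let s := name.toList ++ part1.toList ++ part2.toList
  let strSet := PySem.Set.ofList s
  let commonCount : Int := (s.length : Int) - (strSet.length : Int)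
  let value : Int := (name.toList.length : Int) - commonCount
  let upper : Char := pvShift (PySem.List.pyGetD name.toList 0 'A') value
  let special : List Char :=
    PySem.Int.toChars value ++ PySem.Int.toChars (name.toList.length : Int) ++
    PySem.Int.toChars (value + (name.toList.length : Int)) ++ pvUpperChr upper ++
    (PySem.Dict.getD pvSymbolsA (PySem.Int.mod value 10) "!").toList
  String.ofList (pvLoop1 special key.toList value)

-- ===== PORT B =====

-- the for-loop 'for i, ch in enumerate(special): chars.insert(2*i, ch)'
def pvInsertAll (ps : List (Int × Char)) (acc : List Char) : List Char :=
  ps.foldl (fun a p => PySem.List.insert a (2 * p.1) p.2) acc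

def generate_password_logic_alt (name : String) (key : String) (part1 : String) (part2 : String) : String :=
  let s := name.toList ++ part1.toList ++ part2.toList
  let value : Int := (name.toList.length : Int) - ((s.length : Int) - ((PySem.Set.ofList s).length : Int))
  let symbols : List Char := ")!@#$%^&*(".toList
  let special : List Char :=
    PySem.Int.toChars value ++ PySem.Int.toChars (name.toList.length : Int) ++
    PySem.Int.toChars (value + (name.toList.length : Int)) ++
    pvUpperChr (pvShift (PySem.List.pyGetD name.toList 0 'A') value) ++
    [PySem.List.pyGetD symbols (PySem.Int.mod value 10) '!']
  let chars : List Char := key.toList.map (fun c => pvShift c value)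
  String.ofList (pvInsertAll (PySem.List.enumerate special 0) chars)

-- ===== PRECONDITION & SPEC =====
-- Pre_ excludes exactly the inputs on which Python A raises within Dom: IndexError (name[0] on an
-- empty name) and ValueError from chr on a negative code (ord(name[0])+value or ord(key[u])+value
-- below 0); no other bound is imposed.
-- value = len(name) - (len(s) - len(set(s))), the shift A applies to every character
def pvValue (name part1 part2 : String) : Int :=
  (name.toList.length : Int) -
    (((name.toList ++ part1.toList ++ part2.toList).length : Int) -
      ((PySem.Set.ofList (name.toList ++ part1.toList ++ part2.toList)).length : Int))

def Pre_generate_password_logic (name : String) (key : String) (part1 : String) (part2 : String) : Prop :=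
  name.toList ≠ [] ∧
  0 ≤ ((name.toList.headD 'A').toNat : Int) + pvValue name part1 part2 ∧
  (key.toList.all (fun c => decide (0 ≤ (c.toNat : Int) + pvValue name part1 part2)) = true)
instance (name : String) (key : String) (part1 : String) (part2 : String) : Decidable (Pre_generate_password_logic name key part1 part2) := by unfold Pre_generate_password_logic; infer_instance

def pvWitness_generate_password_logic : String × String × String × String := ("Ab", "cd", "", "")

def Spec_generate_password_logic (name : String) (key : String) (part1 : String) (part2 : String) (out : String) : Prop := out = generate_password_logic_alt name key part1 part2
instance (name : String) (key : String) (part1 : String) (part2 : String) (out : String) : Decidable (Spec_generate_password_logic name key part1 part2 out) := by unfold Spec_generate_password_logic; infer_instance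

-- ===== CLAIM (what is proved, stated in full; the proofs are below) =====
def Claim_equal_generate_password_logic : Prop := ∀ (name : String) (key : String) (part1 : String) (part2 : String), Dom_generate_password_logic name key part1 part2 → Pre_generate_password_logic name key part1 part2 → Spec_generate_password_logic name key part1 part2 (generate_password_logic name key part1 part2)

-- ===== LEMMAS AND PROOFS =====

-- the interleaving both programs compute, as a mathematical object
def pvMergeZ : List Char → List Char → List Char
  | s :: ss, k :: kk => s :: k :: pvMergeZ ss kk
  | sp, ks => sp ++ ks

theorem pvMergeZ_nil_left (ks : List Char) : pvMergeZ [] ks = ks := by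
  cases ks <;> rfl

theorem pvMergeZ_nil_right (sp : List Char) : pvMergeZ sp [] = sp := by
  cases sp <;> simp [pvMergeZ]

theorem pvMergeZ_cons (a b : Char) (sp ks : List Char) :
    pvMergeZ (a :: sp) (b :: ks) = a :: b :: pvMergeZ sp ks := rfl

theorem pvLoop2_eq (sp : List Char) : pvLoop2 sp = sp := by
  induction sp with
  | nil => rfl
  | cons c cs ih => simp [pvLoop2, ih]

theorem pvLoop3_eq (ks : List Char) (v : Int) : pvLoop3 ks v = ks.map (fun c => pvShift c v) := by
  induction ks with
  | nil => rfl
  | cons c cs ih => simp [pvLoop3, ih]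

theorem pvLoop1_eq (sp ks : List Char) (v : Int) :
    pvLoop1 sp ks v = pvMergeZ sp (ks.map (fun c => pvShift c v)) := by
  induction sp generalizing ks with
  | nil => simp [pvLoop1, pvLoop2, pvLoop3_eq, pvMergeZ_nil_left]
  | cons s ss ih =>
    cases ks with
    | nil => simp [pvLoop1, pvLoop2_eq, pvLoop3, pvMergeZ_nil_right]
    | cons k kk => simp [pvLoop1, ih, pvMergeZ_cons]

-- list.insert clamps a past-the-end position to an append (Python semantics)
theorem pvInsert_ge (xs : List Char) (p : Nat) (v : Char) (h : xs.length ≤ p) :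
    PySem.List.insert xs (p : Int) v = xs ++ [v] := by
  have h1 : (min (p : Int) xs.length) = (xs.length : Int) := by omega
  have h2 : ¬((p : Int) < 0) := by omega
  simp [PySem.List.insert, PySem.List.sliceIndices, h1, h2]

-- once the shifted key is exhausted, every remaining insert position is past the end
theorem pvInsertAll_tail (cs : List Char) (j : Nat) (P : List Char) (h : P.length ≤ 2 * j) :
    pvInsertAll (PySem.List.enumerate cs (j : Int)) P = P ++ cs := by
  induction cs generalizing j P with
  | nil => simp [pvInsertAll, PySem.List.enumerate]
  | cons c cs ih =>
    have e1 : PySem.List.enumerate (c :: cs) (j : Int) = ((j : Int), c) :: PySem.List.enumerate cs ((j : Int) + 1) := rfl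
    have e2 : ((j : Int) + 1) = ((j + 1 : Nat) : Int) := by push_cast; ring
    have e3 : (2 * (j : Int)) = ((2 * j : Nat) : Int) := by push_cast; ring
    rw [e1]
    simp only [pvInsertAll, List.foldl_cons] at *
    rw [e3, pvInsert_ge P (2 * j) c h, e2, ih (j + 1) (P ++ [c]) (by simp; omega)]
    simp

-- main invariant: with a finished prefix of length 2*i, the remaining inserts interleave
theorem pvInsertAll_merge (sp : List Char) (acc : List Char) (i : Nat) (pre : List Char)
    (h : pre.length = 2 * i) :
    pvInsertAll (PySem.List.enumerate sp (i : Int)) (pre ++ acc) = pre ++ pvMergeZ sp acc := by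
  induction sp generalizing acc i pre with
  | nil => simp [pvInsertAll, PySem.List.enumerate, pvMergeZ_nil_left]
  | cons c cs ih =>
    have e1 : PySem.List.enumerate (c :: cs) (i : Int) = ((i : Int), c) :: PySem.List.enumerate cs ((i : Int) + 1) := rfl
    have e2 : ((i : Int) + 1) = ((i + 1 : Nat) : Int) := by push_cast; ring
    have e3 : (2 * (i : Int)) = ((2 * i : Nat) : Int) := by push_cast; ring
    have hle : 2 * i ≤ (pre ++ acc).length := by simp; omega
    have hins : PySem.List.insert (pre ++ acc) ((2 * i : Nat) : Int) c = pre ++ c :: acc := by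
      rw [PySem.List.insert_natCast _ _ _ hle]
      rw [← h, List.take_left, List.drop_left]
    rw [e1]
    simp only [pvInsertAll, List.foldl_cons] at *
    rw [e3, hins, e2]
    cases acc with
    | nil =>
      have := pvInsertAll_tail cs (i + 1) (pre ++ [c]) (by simp; omega)
      simp only [pvInsertAll] at this
      simpa [pvMergeZ_nil_right, List.append_assoc] using this
    | cons k kk =>
      have hpre : (pre ++ [c, k]).length = 2 * (i + 1) := by simp; omega
      have := ih kk (i + 1) (pre ++ [c, k]) hpre
      simp only [List.append_assoc, List.cons_append, List.nil_append] at this ⊢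
      rw [this, pvMergeZ_cons]

theorem pvInsertAll_merge0 (sp acc : List Char) :
    pvInsertAll (PySem.List.enumerate sp 0) acc = pvMergeZ sp acc :=
  pvInsertAll_merge sp acc 0 [] rfl

theorem pvSymbols_agree (m : Int) (h0 : 0 ≤ m) (h10 : m < 10) :
    (PySem.Dict.getD pvSymbolsA m "!").toList = [PySem.List.pyGetD (")!@#$%^&*(".toList) m '!'] := by
  interval_cases m <;> decide

-- ===== VERDICT (by name: the statement is the Claim_ definition above) =====
theorem generate_password_logic_spec : Claim_equal_generate_password_logic := by
  intro name key part1 part2 _ _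
  unfold Spec_generate_password_logic generate_password_logic generate_password_logic_alt
  simp only []
  rw [pvLoop1_eq, pvSymbols_agree, pvInsertAll_merge0]
  · exact PySem.Int.mod_nonneg _ (by omega)
  · exact PySem.Int.mod_lt _ (by omega)
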